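-- pv_equiv track=rewrite | github.com/fkie-cad/spmac | g-sidon-sets/compute_rulers.py | recursive_multisearch
-- ===== SOURCE A (Python) =====
-- from copy import deepcopy, copy
--
-- def ruler_diff(list, copies):
--     if not is_sidon_set(list, copies):
--         return None
--     diffs = {}
--     for i in range(len(list)):
--         for j in range(i+1, len(list)):
--             d = list[i] - list[j]
--             if d<0:
--                 d=-d
--             if d not in diffs:
--                 diffs[d]=0
--             diffs[d]+=1
--     return diffs
--
-- def is_sidon_set(list, g):
--     diffs = {}
--     for i in range(len(list)):
--         for j in range(i+1, len(list)):
--             d = list[i] - list[j]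
--             if d<0:
--                 d=-d
--             if d not in diffs:
--                 diffs[d] = 0
--             diffs[d]+=1
--
--             if diffs[d] > g:
--                 return False
--
--     return True
--
-- def recursive_multisearch(curr, candidates, copies, target_order):
--
--     res = []
--
--     for cand in candidates:
--         c = copy(curr)
--         c.append(cand)
--
--         diffs = ruler_diff(c, copies)
--         if diffs == None:
--             continue
--
--         if len(c) == target_order:
--             res.append( c )
--             continue
--
--         # check for every candiate number if it can be added to the set without violating the g-Sidon Set property
--         new_cand = [number for number in candidates if number > cand]
--         for d in diffs:
--             if diffs[d] < copies:
--                 continue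
--
--             for n in c:
--                 temp = n-d
--                 if temp in new_cand:
--                     new_cand.remove(temp)
--                 temp = n+d
--                 if temp in new_cand:
--                     new_cand.remove(temp)
--
--         if len(new_cand) >= target_order-len(c):
--             r = recursive_multisearch( c, new_cand, copies, target_order )
--             res += r
--
--     return res
-- ===== SOURCE B (Python) =====
-- def recursive_multisearch(curr, candidates, copies, target_order):
--     # Iterative depth-first search with an explicit frame stack; the pairwise
--     # difference counter is carried in each frame and extended incrementally
--     # per added element instead of being recounted from scratch at every node,
--     # and the per-event list.remove scans are replaced by one counting filter.
--     diffs = {}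
--     for i in range(len(curr)):
--         for j in range(i + 1, len(curr)):
--             d = abs(curr[i] - curr[j])
--             diffs[d] = diffs.get(d, 0) + 1
--     if any(v > copies for v in diffs.values()):
--         return []
--     res = []
--     # frame = (chosen set, its diff counter, this node's candidate pool, still-untried candidates)
--     stack = [(curr, diffs, candidates, candidates)]
--     while stack:
--         c0, d0, cands, todo = stack.pop()
--         if not todo:
--             continue
--         cand, todo = todo[0], todo[1:]
--         stack.append((c0, d0, cands, todo))
--         # extend the inherited diff counter by the new pairs (x, cand)
--         nd = dict(d0)
--         ok = True
--         for x in c0: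
--             d = abs(cand - x)
--             nv = nd.get(d, 0) + 1
--             if nv > copies:
--                 ok = False
--                 break
--             nd[d] = nv
--         if not ok:
--             continue
--         c = c0 + [cand]
--         if len(c) == target_order:
--             res.append(c)
--             continue
--         # count, per value, how many removal events target it
--         events = {}
--         for d, v in nd.items():
--             if v >= copies:
--                 for n in c:
--                     events[n - d] = events.get(n - d, 0) + 1
--                     events[n + d] = events.get(n + d, 0) + 1
--         # single pass: drop the first events[x] occurrences of each value x
--         new_cand = []
--         for x in cands:
--             if x > cand:
--                 e = events.get(x, 0)
--                 if e:
--                     events[x] = e - 1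
--                 else:
--                     new_cand.append(x)
--         if len(new_cand) >= target_order - len(c):
--             stack.append((c, nd, new_cand, new_cand))
--     return res
-- ===== Notes on version B (the rewrite author's own statement) =====
-- stated objective: faster
-- what changed: B replaces A's recursion by an iterative depth-first search over an explicit frame stack; each frame carries the pairwise-difference counter, which is extended incrementally per added element instead of being recounted over all pairs of c at every node, and the per-event list.remove scans are replaced by one counting pass (an events counter built once, then a single filter dropping the first events[x] occurrences of each value).
import Mathlib
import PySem

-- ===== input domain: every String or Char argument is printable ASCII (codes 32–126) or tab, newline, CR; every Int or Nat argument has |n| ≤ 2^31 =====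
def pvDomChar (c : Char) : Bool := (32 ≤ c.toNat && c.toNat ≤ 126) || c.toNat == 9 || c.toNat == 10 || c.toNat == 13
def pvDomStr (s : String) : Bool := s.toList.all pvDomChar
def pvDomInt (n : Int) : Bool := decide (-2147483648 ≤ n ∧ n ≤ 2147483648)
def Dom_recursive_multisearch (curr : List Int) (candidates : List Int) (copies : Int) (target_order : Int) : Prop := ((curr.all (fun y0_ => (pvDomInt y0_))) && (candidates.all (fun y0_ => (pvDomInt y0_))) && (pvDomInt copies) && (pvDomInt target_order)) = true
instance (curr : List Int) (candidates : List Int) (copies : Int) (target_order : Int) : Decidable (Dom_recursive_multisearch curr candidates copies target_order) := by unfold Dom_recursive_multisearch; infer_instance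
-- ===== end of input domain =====

-- B replaces A's recursion (with a per-node from-scratch diff recount and repeated
-- list.remove scans) by an iterative explicit-stack DFS whose frames carry the diff
-- counter, extended incrementally, plus a one-pass counting filter (objective: faster).

-- ===== PORT A =====
-- `d = list[i]-list[j]; if d<0: d=-d`
def pvAbsd (a b : Int) : Int :=
  let d := a - b
  if d < 0 then -d else d

-- inner `for j in range(i+1, len(list))` of is_sidon_set, over the tail after element x
def pvSidonInner (g : Int) (x : Int) (ys : List Int) (diffs : PySem.Dict Int Int) :
    Option (PySem.Dict Int Int) :=
  match ys with
  | [] => some diffs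
  | y :: ys =>
    let d := pvAbsd x y
    let diffs := if diffs.contains d then diffs else diffs.insert d 0
    let diffs := diffs.modify d 0 (· + 1)
    if g < diffs.getD d 0 then none else pvSidonInner g x ys diffs

-- outer `for i in range(len(list))` of is_sidon_set (None = early `return False`)
def pvSidonOuter (g : Int) (l : List Int) (diffs : PySem.Dict Int Int) :
    Option (PySem.Dict Int Int) :=
  match l with
  | [] => some diffs
  | x :: xs =>
    match pvSidonInner g x xs diffs with
    | none => none
    | some diffs => pvSidonOuter g xs diffs

def pvIsSidon (l : List Int) (g : Int) : Bool := (pvSidonOuter g l PySem.Dict.empty).isSome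

-- the counting double loop of ruler_diff (no early exit)
def pvBuildInner (x : Int) (ys : List Int) (diffs : PySem.Dict Int Int) : PySem.Dict Int Int :=
  match ys with
  | [] => diffs
  | y :: ys =>
    let d := pvAbsd x y
    let diffs := if diffs.contains d then diffs else diffs.insert d 0
    pvBuildInner x ys (diffs.modify d 0 (· + 1))

def pvBuildOuter (l : List Int) (diffs : PySem.Dict Int Int) : PySem.Dict Int Int :=
  match l with
  | [] => diffs
  | x :: xs => pvBuildOuter xs (pvBuildInner x xs diffs)

def pvRulerDiff (l : List Int) (copies : Int) : Option (PySem.Dict Int Int) :=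
  if pvIsSidon l copies then some (pvBuildOuter l PySem.Dict.empty) else none

-- `if temp in new_cand: new_cand.remove(temp)`
def pvRemoveIfIn (nc : List Int) (v : Int) : List Int :=
  if v ∈ nc then (PySem.List.remove? nc v).getD nc else nc

-- `for n in c: …remove(n-d)…; …remove(n+d)…`
def pvPruneInner (d : Int) (c : List Int) (nc : List Int) : List Int :=
  match c with
  | [] => nc
  | n :: c => pvPruneInner d c (pvRemoveIfIn (pvRemoveIfIn nc (n - d)) (n + d))

-- `for d in diffs: if diffs[d] < copies: continue; …`
def pvPruneA (copies : Int) (c : List Int) (items : List (Int × Int)) (nc : List Int) : List Int :=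
  match items with
  | [] => nc
  | (d, v) :: rest =>
    if v < copies then pvPruneA copies c rest nc
    else pvPruneA copies c rest (pvPruneInner d c nc)

theorem pvRemoveIfIn_length_le (nc : List Int) (v : Int) :
    (pvRemoveIfIn nc v).length ≤ nc.length := by
  unfold pvRemoveIfIn
  split
  · rename_i h
    rw [PySem.List.remove?_eq_some_erase _ _ h]
    simpa using (List.length_erase_le : (nc.erase v).length ≤ nc.length)
  · exact le_rfl

theorem pvPruneInner_length_le (d : Int) (c nc : List Int) :
    (pvPruneInner d c nc).length ≤ nc.length := by
  induction c generalizing nc with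
  | nil => exact le_rfl
  | cons n c ih =>
    exact le_trans (ih _) (le_trans (pvRemoveIfIn_length_le _ _)
      (pvRemoveIfIn_length_le _ _))

theorem pvPruneA_length_le (copies : Int) (c : List Int) (items : List (Int × Int))
    (nc : List Int) : (pvPruneA copies c items nc).length ≤ nc.length := by
  induction items generalizing nc with
  | nil => exact le_rfl
  | cons p rest ih =>
    obtain ⟨d, v⟩ := p
    unfold pvPruneA
    split
    · exact ih nc
    · exact le_trans (ih _) (pvPruneInner_length_le _ _ _)

theorem pvFilter_lt_length {cand : Int} {cands : List Int} (h : cand ∈ cands) :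
    (cands.filter (fun number => decide (cand < number))).length < cands.length := by
  apply List.length_filter_lt_length_iff_exists.mpr
  exact ⟨cand, h, by simp⟩

-- the main `for cand in candidates` loop; `rest` is the not-yet-processed part of the loop
def pvALoop (copies target_order : Int) (curr cands rest : List Int)
    (h : ∀ x ∈ rest, x ∈ cands) : List (List Int) :=
  match rest with
  | [] => []
  | cand :: rest' =>
    (let c := curr ++ [cand]
     match pvRulerDiff c copies with
     | none => []
     | some diffs =>
       if PySem.List.len c = target_order then [c]
       else
         let new_cand := pvPruneA copies c diffs.items
           (cands.filter (fun number => decide (cand < number)))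
         if target_order - PySem.List.len c ≤ PySem.List.len new_cand then
           pvALoop copies target_order c new_cand new_cand (fun _ hx => hx)
         else []) ++
    pvALoop copies target_order curr cands rest' (fun x hx => h x (List.mem_cons_of_mem _ hx))
termination_by (cands.length, rest.length)
decreasing_by
  · apply Prod.Lex.left
    rw [List.unattach_filter (g := fun number => decide (cand < number)) (hf := fun x h => rfl), List.unattach_attach]
    exact lt_of_le_of_lt (pvPruneA_length_le _ _ _ _)
      (pvFilter_lt_length (h cand (List.mem_cons_self ..)))
  · apply Prod.Lex.right
    simp

def recursive_multisearch (curr : List Int) (candidates : List Int) (copies : Int)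
    (target_order : Int) : List (List Int) :=
  pvALoop copies target_order curr candidates candidates (fun _ hx => hx)

-- ===== PORT B =====
-- `diffs[d] = diffs.get(d, 0) + 1`
def pvBump (ev : PySem.Dict Int Int) (v : Int) : PySem.Dict Int Int :=
  ev.insert v (ev.getD v 0 + 1)

-- base-counter double loop of Source B
def pvCntInner (x : Int) (ys : List Int) (d : PySem.Dict Int Int) : PySem.Dict Int Int :=
  match ys with
  | [] => d
  | y :: ys => pvCntInner x ys (pvBump d (|x - y|))

def pvCntOuter (l : List Int) (d : PySem.Dict Int Int) : PySem.Dict Int Int :=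
  match l with
  | [] => d
  | x :: xs => pvCntOuter xs (pvCntInner x xs d)

-- `for x in c0: … if nv > copies: ok = False; break … nd[d] = nv`
def pvExtend (copies cand : Int) (xs : List Int) (nd : PySem.Dict Int Int) :
    Option (PySem.Dict Int Int) :=
  match xs with
  | [] => some nd
  | x :: xs =>
    let d := |cand - x|
    let nv := nd.getD d 0 + 1
    if copies < nv then none else pvExtend copies cand xs (nd.insert d nv)

-- `for n in c: events[n-d] += 1; events[n+d] += 1`
def pvEventsInner (d : Int) (c : List Int) (ev : PySem.Dict Int Int) : PySem.Dict Int Int :=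
  match c with
  | [] => ev
  | n :: c => pvEventsInner d c (pvBump (pvBump ev (n - d)) (n + d))

-- `for d, v in nd.items(): if v >= copies: …`
def pvEvents (copies : Int) (c : List Int) (items : List (Int × Int))
    (ev : PySem.Dict Int Int) : PySem.Dict Int Int :=
  match items with
  | [] => ev
  | (d, v) :: rest =>
    if copies ≤ v then pvEvents copies c rest (pvEventsInner d c ev)
    else pvEvents copies c rest ev

-- `for x in cands: if x > cand: e = events.get(x, 0); if e: events[x] = e-1 else: append`
def pvBFilter (cand : Int) (ev : PySem.Dict Int Int) (xs : List Int) : List Int :=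
  match xs with
  | [] => []
  | x :: xs =>
    if cand < x then
      let e := ev.getD x 0
      if e ≠ 0 then pvBFilter cand (ev.insert x (e - 1)) xs
      else x :: pvBFilter cand ev xs
    else pvBFilter cand ev xs

theorem pvBFilter_length_le (cand : Int) (ev : PySem.Dict Int Int) (xs : List Int) :
    (pvBFilter cand ev xs).length ≤ (xs.filter (fun x => decide (cand < x))).length := by
  induction xs generalizing ev with
  | nil => exact le_rfl
  | cons x xs ih =>
    unfold pvBFilter
    by_cases hx : cand < x
    · simp only [hx, if_true, List.filter_cons, decide_eq_true_eq]
      split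
      · exact le_trans (ih _) (by simp)
      · simpa [hx] using ih ev
    · simpa [hx, List.filter_cons] using ih ev

-- one stack frame of Source B's while loop: (c0, d0, cands, todo); hsub records
-- todo ⊆ cands (true of every frame Source B ever pushes), used only for termination
structure PvFrame where
  curr : List Int
  diffs : PySem.Dict Int Int
  cands : List Int
  todo : List Int
  hsub : ∀ x ∈ todo, x ∈ cands

def pvPhi (s : List PvFrame) : Nat :=
  (s.map (fun f => (f.todo.length + 1) * (f.cands.length + 1).factorial)).sum

theorem pv_mul_factorial_lt {k L : Nat} (h : k ≤ L) :
    k * k.factorial < (L + 1).factorial := by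
  calc k * k.factorial ≤ L * L.factorial :=
        Nat.mul_le_mul h (Nat.factorial_le h)
    _ < (L + 1) * L.factorial := by
        have := L.factorial_pos
        nlinarith
    _ = (L + 1).factorial := rfl

-- Source B's `while stack:` loop (stack top = list head); res is emitted in order
def pvRun (copies t : Int) (s : List PvFrame) : List (List Int) :=
  match s with
  | [] => []
  | ⟨_c0, _d0, _cands, [], _h⟩ :: s' => pvRun copies t s'
  | ⟨c0, d0, cands, cand :: rest, h⟩ :: s' =>
    let cont : PvFrame := ⟨c0, d0, cands, rest,
      fun x hx => h x (List.mem_cons_of_mem _ hx)⟩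
    match pvExtend copies cand c0 d0 with
    | none => pvRun copies t (cont :: s')
    | some nd =>
      let c := c0 ++ [cand]
      if PySem.List.len c = t then c :: pvRun copies t (cont :: s')
      else
        let ev := pvEvents copies c nd.items PySem.Dict.empty
        let nc := pvBFilter cand ev cands
        if t - PySem.List.len c ≤ PySem.List.len nc then
          pvRun copies t (⟨c, nd, nc, nc, fun _ hx => hx⟩ :: cont :: s')
        else pvRun copies t (cont :: s')
termination_by pvPhi s
decreasing_by
  · simp only [pvPhi, List.map_cons, List.sum_cons, List.length_nil]
    have hp := (_cands.length + 1).factorial_pos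
    omega
  · simp only [pvPhi, List.map_cons, List.sum_cons, List.length_cons]
    have hd : (rest.length + 1 + 1) * (cands.length + 1).factorial =
        (rest.length + 1) * (cands.length + 1).factorial +
          (cands.length + 1).factorial := by ring
    have hp := (cands.length + 1).factorial_pos
    omega
  · simp only [pvPhi, List.map_cons, List.sum_cons, List.length_cons]
    have hlt : (pvBFilter cand
        (pvEvents copies (c0 ++ [cand]) nd.items PySem.Dict.empty) cands).length
        < cands.length :=
      lt_of_le_of_lt (pvBFilter_length_le _ _ _)
        (pvFilter_lt_length (h cand (List.mem_cons_self ..)))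
    have hkey : ((pvBFilter cand
        (pvEvents copies (c0 ++ [cand]) nd.items PySem.Dict.empty) cands).length + 1) *
        ((pvBFilter cand
        (pvEvents copies (c0 ++ [cand]) nd.items PySem.Dict.empty) cands).length + 1).factorial <
        (cands.length + 1).factorial := pv_mul_factorial_lt hlt
    have hd : (rest.length + 1 + 1) * (cands.length + 1).factorial =
        (rest.length + 1) * (cands.length + 1).factorial +
          (cands.length + 1).factorial := by ring
    omega

def recursive_multisearch_alt (curr : List Int) (candidates : List Int) (copies : Int)
    (target_order : Int) : List (List Int) :=
  let diffs := pvCntOuter curr PySem.Dict.empty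
  if diffs.values.any (fun v => decide (copies < v)) then []
  else pvRun copies target_order [⟨curr, diffs, candidates, candidates, fun _ hx => hx⟩]

-- ===== PRECONDITION & SPEC =====
def Spec_recursive_multisearch (curr : List Int) (candidates : List Int) (copies : Int) (target_order : Int) (out : List (List Int)) : Prop := out = recursive_multisearch_alt curr candidates copies target_order
instance (curr : List Int) (candidates : List Int) (copies : Int) (target_order : Int) (out : List (List Int)) : Decidable (Spec_recursive_multisearch curr candidates copies target_order out) := by unfold Spec_recursive_multisearch; infer_instance

-- ===== CLAIM (what is proved, stated in full; the proofs are below) =====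
def Claim_equal_recursive_multisearch : Prop := ∀ (curr : List Int) (candidates : List Int) (copies : Int) (target_order : Int), Dom_recursive_multisearch curr candidates copies target_order → Spec_recursive_multisearch curr candidates copies target_order (recursive_multisearch curr candidates copies target_order)

-- ===== LEMMAS AND PROOFS =====

-- multiset of pairwise absolute differences (the thing both diff dicts count)
def pairDiffs : List Int → List Int
  | [] => []
  | x :: xs => xs.map (fun y => |x - y|) ++ pairDiffs xs

-- dict D represents the counter of the multiset m (values, key membership, unique keys)
def DContent (D : PySem.Dict Int Int) (m : List Int) : Prop :=
  (∀ v, D.getD v 0 = (m.count v : Int)) ∧ (∀ v, D.contains v = true ↔ v ∈ m) ∧ D.keys.Nodup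

theorem DContent_empty : DContent PySem.Dict.empty [] := by
  refine ⟨fun v => ?_, fun v => ?_, ?_⟩ <;>
    simp [PySem.Dict.getD_empty, PySem.Dict.contains_empty]

theorem DContent_congr {D : PySem.Dict Int Int} {m m' : List Int}
    (hc : ∀ v, m.count v = m'.count v) (h : DContent D m) : DContent D m' := by
  obtain ⟨h1, h2, h3⟩ := h
  refine ⟨fun v => by rw [h1, hc], fun v => ?_, h3⟩
  rw [h2]
  constructor <;> intro hv
  · have := List.count_pos_iff.mpr hv
    rw [hc] at this
    exact List.count_pos_iff.mp this
  · have := List.count_pos_iff.mpr hv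
    rw [← hc] at this
    exact List.count_pos_iff.mp this

theorem pvAbsd_eq_abs (a b : Int) : pvAbsd a b = |a - b| := by
  show (if a - b < 0 then -(a-b) else (a-b)) = |a - b|
  split <;> rename_i h
  · rw [abs_of_neg h]
  · rw [abs_of_nonneg (by omega)]

-- one `diffs[d] += 1` step (with the `if d not in diffs` guard), on content
theorem count_append_singleton_self (m : List Int) (d : Int) :
    (m ++ [d]).count d = m.count d + 1 := by simp

theorem count_append_singleton_ne (m : List Int) {v d : Int} (h : v ≠ d) :
    (m ++ [d]).count v = m.count v := by simp [List.count_append, Ne.symm h]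

theorem DContent_step {D : PySem.Dict Int Int} {m : List Int} (h : DContent D m) (d : Int) :
    DContent ((if D.contains d then D else D.insert d 0).modify d 0 (· + 1)) (m ++ [d]) := by
  obtain ⟨h1, h2, h3⟩ := h
  have hg : ∀ v, (if D.contains d then D else D.insert d 0).getD v 0 = D.getD v 0 := by
    intro v
    split
    · rfl
    · rename_i hc
      rw [PySem.Dict.getD_insert]
      split
      · rename_i hv
        subst hv
        rw [PySem.Dict.getD_of_not_contains _ _ (by simpa using hc)]
      · rfl
  have hcont : ∀ v, (if D.contains d then D else D.insert d 0).contains v =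
      (v == d || D.contains v) := by
    intro v
    split
    · rename_i hc
      by_cases hv : v = d
      · subst hv; simp [hc]
      · simp [hv]
    · rw [PySem.Dict.contains_insert]
  refine ⟨fun v => ?_, fun v => ?_, ?_⟩
  · rw [PySem.Dict.getD_modify, hg, hg]
    by_cases hv : v = d
    · subst hv
      rw [if_pos rfl, h1, count_append_singleton_self]
      push_cast; ring
    · rw [if_neg hv, h1, count_append_singleton_ne _ hv]
  · rw [PySem.Dict.contains_modify, hcont]
    by_cases hv : v = d
    · subst hv; simp
    · simp [hv, h2, List.mem_append]
  · rw [PySem.Dict.keys_modify]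
    apply PySem.Dict.nodup_keys_insert
    split
    · exact h3
    · exact PySem.Dict.nodup_keys_insert _ _ _ h3

-- one `ev[u] = ev.get(u,0)+1` step, on content
theorem DContent_bump {D : PySem.Dict Int Int} {m : List Int} (h : DContent D m) (d : Int) :
    DContent (pvBump D d) (m ++ [d]) := by
  obtain ⟨h1, h2, h3⟩ := h
  refine ⟨fun v => ?_, fun v => ?_, PySem.Dict.nodup_keys_insert _ _ _ h3⟩
  · rw [pvBump, PySem.Dict.getD_insert]
    by_cases hv : v = d
    · subst hv
      rw [if_pos rfl, h1, count_append_singleton_self]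
      push_cast; ring
    · rw [if_neg hv, h1, count_append_singleton_ne _ hv]
  · rw [pvBump, PySem.Dict.contains_insert]
    by_cases hv : v = d
    · subst hv; simp
    · simp [hv, h2]

theorem pvBuildInner_content {D : PySem.Dict Int Int} {m : List Int} (h : DContent D m)
    (x : Int) (ys : List Int) :
    DContent (pvBuildInner x ys D) (m ++ ys.map (fun y => |x - y|)) := by
  induction ys generalizing D m with
  | nil => simpa [pvBuildInner] using h
  | cons y ys ih =>
    have step := DContent_step h (|x - y|)
    have := ih step
    rw [pvBuildInner, pvAbsd_eq_abs]
    simpa [List.append_assoc] using this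

theorem pvBuildOuter_content {D : PySem.Dict Int Int} {m : List Int} (h : DContent D m)
    (l : List Int) : DContent (pvBuildOuter l D) (m ++ pairDiffs l) := by
  induction l generalizing D m with
  | nil => simpa [pvBuildOuter, pairDiffs] using h
  | cons x xs ih =>
    have := ih (pvBuildInner_content h x xs)
    rw [pvBuildOuter]
    simpa [pairDiffs, List.append_assoc] using this

theorem pvCntInner_content {D : PySem.Dict Int Int} {m : List Int} (h : DContent D m)
    (x : Int) (ys : List Int) :
    DContent (pvCntInner x ys D) (m ++ ys.map (fun y => |x - y|)) := by
  induction ys generalizing D m with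
  | nil => simpa [pvCntInner] using h
  | cons y ys ih =>
    have := ih (DContent_bump h (|x - y|))
    rw [pvCntInner]
    simpa [List.append_assoc] using this

theorem pvCntOuter_content {D : PySem.Dict Int Int} {m : List Int} (h : DContent D m)
    (l : List Int) : DContent (pvCntOuter l D) (m ++ pairDiffs l) := by
  induction l generalizing D m with
  | nil => simpa [pvCntOuter, pairDiffs] using h
  | cons x xs ih =>
    have := ih (pvCntInner_content h x xs)
    rw [pvCntOuter]
    simpa [pairDiffs, List.append_assoc] using this

-- early-exit loops return None exactly iff some final count overflows
theorem pvSidonInner_spec {D : PySem.Dict Int Int} {m : List Int} {g : Int}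
    (hD : DContent D m) (hg : ∀ v ∈ m, (m.count v : Int) ≤ g) (x : Int) (ys : List Int) :
    (pvSidonInner g x ys D = none ↔
      ∃ v ∈ m ++ ys.map (fun y => |x - y|), g < (((m ++ ys.map (fun y => |x - y|)).count v : Int))) ∧
    (∀ D', pvSidonInner g x ys D = some D' →
      DContent D' (m ++ ys.map (fun y => |x - y|)) ∧
      ∀ v ∈ m ++ ys.map (fun y => |x - y|), (((m ++ ys.map (fun y => |x - y|)).count v : Int)) ≤ g) := by
  induction ys generalizing D m with
  | nil =>
    simp only [List.map_nil, List.append_nil, pvSidonInner]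
    refine ⟨⟨fun hc => by simp at hc, fun hx => ?_⟩, fun D' hD' => ?_⟩
    · obtain ⟨v, hv, hlt⟩ := hx
      exact absurd (hg v hv) (not_le.mpr hlt)
    · injection hD' with h
      subst h
      exact ⟨hD, hg⟩
  | cons y ys ih =>
    simp only [pvSidonInner, pvAbsd_eq_abs]
    have hstep := DContent_step hD (|x - y|)
    have hval : ((if D.contains |x - y| then D else D.insert (|x - y|) 0).modify (|x - y|) 0
        (· + 1)).getD (|x - y|) 0 = (m.count (|x - y|) : Int) + 1 := by
      rw [hstep.1, count_append_singleton_self]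
      push_cast
      ring
    by_cases hov : g < (m.count (|x - y|) : Int) + 1
    · rw [if_pos (by rw [hval]; exact hov)]
      refine ⟨⟨fun _ => ?_, fun _ => rfl⟩, fun D' hD' => by simp at hD'⟩
      refine ⟨|x - y|, by simp, ?_⟩
      have hcnt : (m ++ (y :: ys).map (fun y => |x - y|)).count (|x - y|) =
          m.count (|x - y|) + 1 + ((ys.map (fun y => |x - y|)).count (|x - y|)) := by
        simp [List.count_append]
        ring
      rw [hcnt]
      push_cast
      omega
    · rw [if_neg (by rw [hval]; exact hov)]
      have hg1 : ∀ v ∈ m ++ [|x - y|], ((m ++ [|x - y|]).count v : Int) ≤ g := by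
        intro v hv
        by_cases hveq : v = |x - y|
        · subst hveq
          rw [count_append_singleton_self]
          push_cast
          push_cast at hov
          omega
        · rw [count_append_singleton_ne _ hveq]
          rcases List.mem_append.mp hv with h' | h'
          · exact hg v h'
          · exact absurd (List.mem_singleton.mp h') hveq
      have := ih hstep hg1
      simpa [List.append_assoc] using this

theorem pvSidonOuter_spec {D : PySem.Dict Int Int} {m : List Int} {g : Int}
    (hD : DContent D m) (hg : ∀ v ∈ m, (m.count v : Int) ≤ g) (l : List Int) :
    (pvSidonOuter g l D = none ↔
      ∃ v ∈ m ++ pairDiffs l, g < (((m ++ pairDiffs l).count v : Int))) ∧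
    (∀ D', pvSidonOuter g l D = some D' →
      DContent D' (m ++ pairDiffs l) ∧
      ∀ v ∈ m ++ pairDiffs l, (((m ++ pairDiffs l).count v : Int)) ≤ g) := by
  induction l generalizing D m with
  | nil =>
    simp only [pairDiffs, List.append_nil, pvSidonOuter]
    refine ⟨⟨fun hc => by simp at hc, fun hx => ?_⟩, fun D' hD' => ?_⟩
    · obtain ⟨v, hv, hlt⟩ := hx
      exact absurd (hg v hv) (not_le.mpr hlt)
    · injection hD' with h
      subst h
      exact ⟨hD, hg⟩
  | cons x xs ih =>
    obtain ⟨hn, hs⟩ := pvSidonInner_spec hD hg x xs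
    rw [pvSidonOuter]
    cases hcase : pvSidonInner g x xs D with
    | none =>
      refine ⟨⟨fun _ => ?_, fun _ => rfl⟩, fun D' hD' => by simp at hD'⟩
      obtain ⟨v, hv, hlt⟩ := hn.mp hcase
      refine ⟨v, ?_, ?_⟩
      · simp only [pairDiffs]
        rcases List.mem_append.mp hv with h' | h'
        · exact List.mem_append.mpr (Or.inl h')
        · exact List.mem_append.mpr (Or.inr (List.mem_append.mpr (Or.inl h')))
      · have hmono : (m ++ xs.map (fun y => |x - y|)).count v ≤
            (m ++ pairDiffs (x :: xs)).count v := by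
          simp only [pairDiffs, List.count_append]
          omega
        omega
    | some D1 =>
      obtain ⟨hD1, hg1⟩ := hs D1 hcase
      have := ih hD1 hg1
      simpa [pairDiffs, List.append_assoc] using this

theorem pvExtend_spec {D : PySem.Dict Int Int} {m : List Int} {copies : Int}
    (hD : DContent D m) (hg : ∀ v ∈ m, (m.count v : Int) ≤ copies) (cand : Int) (xs : List Int) :
    (pvExtend copies cand xs D = none ↔
      ∃ v ∈ m ++ xs.map (fun x => |cand - x|), copies < (((m ++ xs.map (fun x => |cand - x|)).count v : Int))) ∧
    (∀ D', pvExtend copies cand xs D = some D' →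
      DContent D' (m ++ xs.map (fun x => |cand - x|)) ∧
      ∀ v ∈ m ++ xs.map (fun x => |cand - x|), (((m ++ xs.map (fun x => |cand - x|)).count v : Int)) ≤ copies) := by
  induction xs generalizing D m with
  | nil =>
    simp only [List.map_nil, List.append_nil, pvExtend]
    refine ⟨⟨fun hc => by simp at hc, fun hx => ?_⟩, fun D' hD' => ?_⟩
    · obtain ⟨v, hv, hlt⟩ := hx
      exact absurd (hg v hv) (not_le.mpr hlt)
    · injection hD' with h
      subst h
      exact ⟨hD, hg⟩
  | cons x xs ih =>
    simp only [pvExtend]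
    have hstep : DContent (D.insert (|cand - x|) (D.getD (|cand - x|) 0 + 1))
        (m ++ [|cand - x|]) := DContent_bump hD (|cand - x|)
    have hval : D.getD (|cand - x|) 0 + 1 = (m.count (|cand - x|) : Int) + 1 := by
      rw [hD.1]
    by_cases hov : copies < (m.count (|cand - x|) : Int) + 1
    · rw [if_pos (by rw [hval]; exact hov)]
      refine ⟨⟨fun _ => ?_, fun _ => rfl⟩, fun D' hD' => by simp at hD'⟩
      refine ⟨|cand - x|, by simp, ?_⟩
      have hcnt : (m ++ (x :: xs).map (fun x => |cand - x|)).count (|cand - x|) =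
          m.count (|cand - x|) + 1 + ((xs.map (fun x => |cand - x|)).count (|cand - x|)) := by
        simp [List.count_append]
        ring
      rw [hcnt]
      push_cast
      omega
    · rw [if_neg (by rw [hval]; exact hov)]
      have hg1 : ∀ v ∈ m ++ [|cand - x|], ((m ++ [|cand - x|]).count v : Int) ≤ copies := by
        intro v hv
        by_cases hveq : v = |cand - x|
        · subst hveq
          rw [count_append_singleton_self]
          push_cast
          push_cast at hov
          omega
        · rw [count_append_singleton_ne _ hveq]
          rcases List.mem_append.mp hv with h' | h'
          · exact hg v h'
          · exact absurd (List.mem_singleton.mp h') hveq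
      have := ih hstep hg1
      simpa [List.append_assoc] using this

-- pairDiffs of a list extended on the right
theorem count_pairDiffs_append (l : List Int) (a v : Int) :
    (pairDiffs (l ++ [a])).count v = (pairDiffs l).count v + (l.map (fun x => |a - x|)).count v := by
  induction l with
  | nil => simp [pairDiffs]
  | cons x l ih =>
    have habs : |x - a| = |a - x| := abs_sub_comm x a
    simp only [List.cons_append, pairDiffs, List.map_append, List.map_cons, List.map_nil,
      List.count_append, List.count_cons, List.count_nil, ih, habs]
    split_ifs <;> omega

-- canonical form of the removal process: drop the first (ev x) occurrences of each x
def pvF (ev : Int → Int) (l : List Int) : List Int :=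
  match l with
  | [] => []
  | x :: xs =>
    if ev x = 0 then x :: pvF ev xs
    else pvF (fun w => if w = x then ev x - 1 else ev w) xs

theorem pvRemoveIfIn_eq_erase (l : List Int) (v : Int) : pvRemoveIfIn l v = l.erase v := by
  unfold pvRemoveIfIn
  split
  · rename_i h
    rw [PySem.List.remove?_eq_some_erase _ _ h]
    rfl
  · rename_i h
    rw [List.erase_of_not_mem h]

theorem pvF_bump {ev : Int → Int} (hnn : ∀ w, 0 ≤ ev w) (v : Int) (l : List Int) :
    pvF (fun w => if w = v then ev w + 1 else ev w) l = pvF ev (l.erase v) := by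
  induction l generalizing ev with
  | nil => rfl
  | cons x xs ih =>
    by_cases hxv : x = v
    · subst hxv
      have hne : ¬ (if x = x then ev x + 1 else ev x) = 0 := by
        have := hnn x
        simp
        omega
      rw [List.erase_cons_head, pvF, if_neg hne]
      have hfe : (fun w => if w = x then (if x = x then ev x + 1 else ev x) - 1
          else if w = x then ev w + 1 else ev w) = ev := by
        funext w
        by_cases hw : w = x <;> simp [hw]
      rw [hfe]
    · rw [List.erase_cons_tail (by simpa using hxv)]
      rw [pvF, pvF]
      simp only [if_neg hxv]
      by_cases hz : ev x = 0
      · rw [if_pos hz, if_pos hz, ih hnn]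
      · rw [if_neg hz, if_neg hz]
        have hnn2 : ∀ w, 0 ≤ (fun u => if u = x then ev x - 1 else ev u) w := by
          intro w
          by_cases hw : w = x
          · simp only [hw, if_true]
            have := hnn x
            omega
          · simp only [if_neg hw]
            exact hnn w
        have hfe : (fun w => if w = x then ev x - 1 else if w = v then ev w + 1 else ev w) =
            (fun w => if w = v then (fun u => if u = x then ev x - 1 else ev u) w + 1
              else (fun u => if u = x then ev x - 1 else ev u) w) := by
          funext w
          by_cases hwx : w = x
          · subst hwx
            simp [hxv]
          · by_cases hwv : w = v <;> simp [hwx, hwv, Ne.symm hxv]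
        rw [hfe, ih hnn2]

theorem pvF_zero (l : List Int) : pvF (fun _ => (0 : Int)) l = l := by
  induction l with
  | nil => rfl
  | cons x xs ih => rw [pvF, if_pos rfl, ih]

-- the event sequence a diffs-items list generates
def pvEventSeq (copies : Int) (c : List Int) (items : List (Int × Int)) : List Int :=
  items.flatMap (fun p =>
    if p.2 < copies then [] else c.flatMap (fun n => [n - p.1, n + p.1]))

theorem foldl_remove_eq_pvF (es l : List Int) :
    es.foldl pvRemoveIfIn l = pvF (fun v => (es.count v : Int)) l := by
  induction es generalizing l with
  | nil =>
    simp only [List.foldl_nil, List.count_nil, Nat.cast_zero]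
    exact (pvF_zero l).symm
  | cons e es ih =>
    rw [List.foldl_cons, ih, pvRemoveIfIn_eq_erase,
      ← pvF_bump (ev := fun v => (es.count v : Int)) (fun w => Int.natCast_nonneg _) e l]
    congr 1
    funext w
    by_cases hw : w = e
    · subst hw
      simp
    · simp [hw, Ne.symm hw]

theorem pvPruneInner_eq_foldl (d : Int) (c nc : List Int) :
    pvPruneInner d c nc = (c.flatMap (fun n => [n - d, n + d])).foldl pvRemoveIfIn nc := by
  induction c generalizing nc with
  | nil => rfl
  | cons n c ih =>
    rw [pvPruneInner, ih, List.flatMap_cons, List.foldl_append]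
    rfl

theorem pvPruneA_eq_foldl (copies : Int) (c : List Int) (items : List (Int × Int))
    (nc : List Int) :
    pvPruneA copies c items nc = (pvEventSeq copies c items).foldl pvRemoveIfIn nc := by
  induction items generalizing nc with
  | nil => rfl
  | cons p rest ih =>
    obtain ⟨d, v⟩ := p
    rw [pvPruneA]
    by_cases hv : v < copies
    · rw [if_pos hv, ih]
      simp [pvEventSeq, hv]
    · rw [if_neg hv, ih, pvPruneInner_eq_foldl]
      simp [pvEventSeq, hv, List.foldl_append]

theorem pvPruneA_eq_pvF (copies : Int) (c : List Int) (items : List (Int × Int)) (nc : List Int) :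
    pvPruneA copies c items nc = pvF (fun v => ((pvEventSeq copies c items).count v : Int)) nc := by
  rw [pvPruneA_eq_foldl, foldl_remove_eq_pvF]

theorem pvBFilter_eq_pvF (cand : Int) (ev : PySem.Dict Int Int) (xs : List Int) :
    pvBFilter cand ev xs = pvF (fun v => ev.getD v 0)
      (xs.filter (fun x => decide (cand < x))) := by
  induction xs generalizing ev with
  | nil => rfl
  | cons x xs ih =>
    rw [pvBFilter]
    by_cases hx : cand < x
    · rw [if_pos hx, List.filter_cons_of_pos (by simpa using hx), pvF]
      by_cases hz : ev.getD x 0 = 0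
      · rw [if_neg (not_not_intro hz), if_pos hz, ih]
      · rw [if_pos hz, if_neg hz, ih]
        congr 1
        funext v
        rw [PySem.Dict.getD_insert]
    · rw [if_neg hx, List.filter_cons_of_neg (by simpa using hx), ih]

theorem pvBump_getD (ev : PySem.Dict Int Int) (u v : Int) :
    (pvBump ev u).getD v 0 = ev.getD v 0 + if v = u then 1 else 0 := by
  unfold pvBump
  rw [PySem.Dict.getD_insert]
  by_cases hv : v = u
  · subst hv
    simp
  · simp [hv]

theorem pvEventsInner_getD (d : Int) (c : List Int) (ev : PySem.Dict Int Int) (v : Int) :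
    (pvEventsInner d c ev).getD v 0 =
      ev.getD v 0 + ((c.flatMap (fun n => [n - d, n + d])).count v : Int) := by
  induction c generalizing ev with
  | nil => simp [pvEventsInner]
  | cons n c ih =>
    rw [pvEventsInner, ih, pvBump_getD, pvBump_getD]
    simp only [List.flatMap_cons, List.count_append, List.count_cons, List.count_nil,
      beq_iff_eq]
    push_cast
    split_ifs <;> omega

theorem pvEvents_getD (copies : Int) (c : List Int) (items : List (Int × Int))
    (ev : PySem.Dict Int Int) (v : Int) :
    (pvEvents copies c items ev).getD v 0 =
      ev.getD v 0 + ((pvEventSeq copies c items).count v : Int) := by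
  induction items generalizing ev with
  | nil => simp [pvEvents, pvEventSeq]
  | cons p rest ih =>
    obtain ⟨d, v2⟩ := p
    rw [pvEvents]
    by_cases hv : copies ≤ v2
    · rw [if_pos hv, ih, pvEventsInner_getD]
      simp only [pvEventSeq, List.flatMap_cons, not_lt.mpr hv, List.count_append]
      push_cast
      ring
    · rw [if_neg hv, ih]
      have hlt : v2 < copies := not_le.mp hv
      simp [pvEventSeq, hlt]

-- two dicts with the same content have permutation-equal items lists
theorem items_perm_of_content {A B : PySem.Dict Int Int} {m : List Int}
    (hA : DContent A m) (hB : DContent B m) : A.items.Perm B.items := by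
  obtain ⟨a1, a2, a3⟩ := hA
  obtain ⟨b1, b2, b3⟩ := hB
  rw [PySem.Dict.items_eq_map_keys A a3 0, PySem.Dict.items_eq_map_keys B b3 0]
  have hk : A.keys.Perm B.keys := by
    rw [List.perm_ext_iff_of_nodup a3 b3]
    intro k
    rw [← PySem.Dict.contains_iff_mem_keys, ← PySem.Dict.contains_iff_mem_keys, a2, b2]
  have hfa : (fun k => (k, A.getD k 0)) = (fun k : Int => (k, (m.count k : Int))) :=
    funext fun k => by rw [a1]
  have hfb : (fun k => (k, B.getD k 0)) = (fun k : Int => (k, (m.count k : Int))) :=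
    funext fun k => by rw [b1]
  rw [hfa, hfb]
  exact hk.map _

-- A = [] when curr itself already violates the g-Sidon bound
theorem pvALoop_of_violated {copies t : Int} {curr : List Int}
    (hv : ∃ v ∈ pairDiffs curr, copies < ((pairDiffs curr).count v : Int))
    (cands rest : List Int) (h : ∀ x ∈ rest, x ∈ cands) :
    pvALoop copies t curr cands rest h = [] := by
  induction rest with
  | nil => simp [pvALoop]
  | cons cand rest' ih =>
    have hsf : pvIsSidon (curr ++ [cand]) copies = false := by
      by_contra hx
      have hs : pvIsSidon (curr ++ [cand]) copies = true := by simpa using hx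
      obtain ⟨W, hW⟩ := Option.isSome_iff_exists.mp (by simpa [pvIsSidon] using hs)
      obtain ⟨hSn, hSs⟩ := pvSidonOuter_spec (g := copies) DContent_empty
        (by simp) (curr ++ [cand])
      simp only [List.nil_append] at hSs
      have hbound := (hSs W hW).2
      obtain ⟨v, hvm, hlt⟩ := hv
      have h1 : (pairDiffs curr).count v ≤ (pairDiffs (curr ++ [cand])).count v := by
        rw [count_pairDiffs_append]
        omega
      have h2 : v ∈ pairDiffs (curr ++ [cand]) := by
        rw [← List.count_pos_iff] at hvm ⊢
        omega
      have := hbound v h2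
      omega
    have hnone : pvRulerDiff (curr ++ [cand]) copies = none := by
      unfold pvRulerDiff
      simp [hsf]
    simp only [pvALoop, hnone, List.nil_append]
    exact ih (fun x hx => h x (List.mem_cons_of_mem _ hx))

-- the per-frame invariant: the frame's dict counts pairDiffs of its set, within bound
def FrameInv (copies : Int) (f : PvFrame) : Prop :=
  DContent f.diffs (pairDiffs f.curr) ∧
    ∀ v ∈ pairDiffs f.curr, ((pairDiffs f.curr).count v : Int) ≤ copies

-- the stack machine of B computes, frame by frame, exactly A's recursive loop
-- the stack machine of B computes, frame by frame, exactly A's recursive loop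
theorem pvRun_eq_flatMap (copies t : Int) (s : List PvFrame) :
    (∀ f ∈ s, FrameInv copies f) →
    pvRun copies t s = s.flatMap
      (fun f => pvALoop copies t f.curr f.cands f.todo f.hsub) := by
  induction s using pvRun.induct copies t with
  | case1 =>
    intro _
    simp [pvRun]
  | case2 c0 d0 cands h s' ih =>
    intro hinv
    rw [pvRun, ih (fun g hg => hinv g (List.mem_cons_of_mem _ hg)), List.flatMap_cons]
    have h0 : pvALoop copies t c0 cands ([] : List Int) h = [] := by
      simp [pvALoop]
    rw [h0, List.nil_append]
  | case3 c0 d0 cands cand rest h s' cont hext ih =>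
    -- pvExtend = none: A's ruler_diff is None on this candidate too
    intro hinv
    rw [pvRun]
    simp only [hext]
    have hD : DContent d0 (pairDiffs c0) := (hinv _ (List.mem_cons_self ..)).1
    have hg : ∀ v ∈ pairDiffs c0, ((pairDiffs c0).count v : Int) ≤ copies :=
      (hinv _ (List.mem_cons_self ..)).2
    rw [ih (by
      intro g hg'
      rcases List.mem_cons.mp hg' with hg' | hg'
      · subst hg'
        exact ⟨hD, hg⟩
      · exact hinv g (List.mem_cons_of_mem _ hg'))]
    have hcnt : ∀ v, (pairDiffs (c0 ++ [cand])).count v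
        = (pairDiffs c0 ++ c0.map (fun x => |cand - x|)).count v := by
      intro v
      rw [count_pairDiffs_append, List.count_append]
    have hmem : ∀ v, v ∈ pairDiffs (c0 ++ [cand]) ↔
        v ∈ pairDiffs c0 ++ c0.map (fun x => |cand - x|) := by
      intro v
      rw [← List.count_pos_iff, ← List.count_pos_iff, hcnt]
    obtain ⟨hEn, _⟩ := pvExtend_spec hD hg cand c0
    obtain ⟨hSn, _⟩ := pvSidonOuter_spec (g := copies) DContent_empty
      (by simp) (c0 ++ [cand])
    simp only [List.nil_append] at hSn
    have hsf : pvIsSidon (c0 ++ [cand]) copies = false := by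
      have hov := hEn.mp hext
      unfold pvIsSidon
      rw [Bool.eq_false_iff]
      intro hsome
      obtain ⟨W, hW⟩ := Option.isSome_iff_exists.mp hsome
      have hne : pvSidonOuter copies (c0 ++ [cand]) PySem.Dict.empty ≠ none := by
        simp [hW]
      rw [Ne, hSn] at hne
      apply hne
      obtain ⟨v, hv, hlt⟩ := hov
      refine ⟨v, (hmem v).mpr hv, ?_⟩
      have := hcnt v
      omega
    have hnone : pvRulerDiff (c0 ++ [cand]) copies = none := by
      unfold pvRulerDiff
      simp [hsf]
    conv_rhs => rw [List.flatMap_cons, pvALoop]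
    simp only [hnone, List.nil_append, List.flatMap_cons]
    rfl
  | case4 c0 d0 cands cand rest h s' cont nd hext c hlen ih =>
    -- leaf: len(c) == target_order
    intro hinv
    have hlen' : PySem.List.len (c0 ++ [cand]) = t := hlen
    rw [pvRun]
    simp only [hext]
    rw [if_pos hlen']
    have hD : DContent d0 (pairDiffs c0) := (hinv _ (List.mem_cons_self ..)).1
    have hg : ∀ v ∈ pairDiffs c0, ((pairDiffs c0).count v : Int) ≤ copies :=
      (hinv _ (List.mem_cons_self ..)).2
    rw [ih (by
      intro g hg'
      rcases List.mem_cons.mp hg' with hg' | hg'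
      · subst hg'
        exact ⟨hD, hg⟩
      · exact hinv g (List.mem_cons_of_mem _ hg'))]
    obtain ⟨hEn, hEs⟩ := pvExtend_spec hD hg cand c0
    obtain ⟨hbC, hbound⟩ := hEs nd hext
    have hs : pvIsSidon (c0 ++ [cand]) copies = true := by
      obtain ⟨hSn, _⟩ := pvSidonOuter_spec (g := copies) DContent_empty
        (by simp) (c0 ++ [cand])
      simp only [List.nil_append] at hSn
      unfold pvIsSidon
      cases hcase : pvSidonOuter copies (c0 ++ [cand]) PySem.Dict.empty with
      | some _ => rfl
      | none =>
        exfalso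
        obtain ⟨v, hv, hlt⟩ := hSn.mp hcase
        have hcnt : (pairDiffs (c0 ++ [cand])).count v
            = (pairDiffs c0 ++ c0.map (fun x => |cand - x|)).count v := by
          rw [count_pairDiffs_append, List.count_append]
        have hv2 : v ∈ pairDiffs c0 ++ c0.map (fun x => |cand - x|) := by
          rw [← List.count_pos_iff] at hv ⊢
          omega
        have := hbound v hv2
        omega
    have hrd : pvRulerDiff (c0 ++ [cand]) copies
        = some (pvBuildOuter (c0 ++ [cand]) PySem.Dict.empty) := by
      unfold pvRulerDiff
      rw [if_pos hs]
    conv_rhs => rw [List.flatMap_cons, pvALoop]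
    simp only [hrd]
    rw [if_pos hlen']
    rfl
  | case5 c0 d0 cands cand rest h s' cont nd hext c hlen ev nc hge ih =>
    -- internal node: push child frame
    intro hinv
    have hlen' : ¬ PySem.List.len (c0 ++ [cand]) = t := hlen
    have hge' : t - PySem.List.len (c0 ++ [cand]) ≤ PySem.List.len
        (pvBFilter cand (pvEvents copies (c0 ++ [cand]) nd.items PySem.Dict.empty) cands) := hge
    rw [pvRun]
    simp only [hext]
    rw [if_neg hlen', if_pos hge']
    have hD : DContent d0 (pairDiffs c0) := (hinv _ (List.mem_cons_self ..)).1
    have hg : ∀ v ∈ pairDiffs c0, ((pairDiffs c0).count v : Int) ≤ copies :=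
      (hinv _ (List.mem_cons_self ..)).2
    obtain ⟨hEn, hEs⟩ := pvExtend_spec hD hg cand c0
    have hcnt : ∀ v, (pairDiffs (c0 ++ [cand])).count v
        = (pairDiffs c0 ++ c0.map (fun x => |cand - x|)).count v := by
      intro v
      rw [count_pairDiffs_append, List.count_append]
    obtain ⟨hnd, hbound⟩ := hEs nd hext
    have hndc : DContent nd (pairDiffs (c0 ++ [cand])) :=
      DContent_congr (fun v => (hcnt v).symm) hnd
    have hgc : ∀ v ∈ pairDiffs (c0 ++ [cand]),
        ((pairDiffs (c0 ++ [cand])).count v : Int) ≤ copies := by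
      intro v hv
      have hv2 : v ∈ pairDiffs c0 ++ c0.map (fun x => |cand - x|) := by
        rw [← List.count_pos_iff] at hv ⊢
        have := hcnt v
        omega
      have := hbound v hv2
      have := hcnt v
      omega
    rw [ih (by
      intro g hg'
      rcases List.mem_cons.mp hg' with hg' | hg'
      · subst hg'
        exact ⟨hndc, hgc⟩
      · rcases List.mem_cons.mp hg' with hg' | hg'
        · subst hg'
          exact ⟨hD, hg⟩
        · exact hinv g (List.mem_cons_of_mem _ hg'))]
    have hs : pvIsSidon (c0 ++ [cand]) copies = true := by
      obtain ⟨hSn, _⟩ := pvSidonOuter_spec (g := copies) DContent_empty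
        (by simp) (c0 ++ [cand])
      simp only [List.nil_append] at hSn
      unfold pvIsSidon
      cases hcase : pvSidonOuter copies (c0 ++ [cand]) PySem.Dict.empty with
      | some _ => rfl
      | none =>
        exfalso
        obtain ⟨v, hv, hlt⟩ := hSn.mp hcase
        have := hgc v hv
        omega
    have hrd : pvRulerDiff (c0 ++ [cand]) copies
        = some (pvBuildOuter (c0 ++ [cand]) PySem.Dict.empty) := by
      unfold pvRulerDiff
      rw [if_pos hs]
    have hDA : DContent (pvBuildOuter (c0 ++ [cand]) PySem.Dict.empty)
        (pairDiffs (c0 ++ [cand])) := by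
      simpa using pvBuildOuter_content DContent_empty (c0 ++ [cand])
    have hperm : (pvBuildOuter (c0 ++ [cand]) PySem.Dict.empty).items.Perm nd.items :=
      items_perm_of_content hDA hndc
    have hnc : pvPruneA copies (c0 ++ [cand])
        (pvBuildOuter (c0 ++ [cand]) PySem.Dict.empty).items
        (cands.filter (fun number => decide (cand < number)))
        = pvBFilter cand
            (pvEvents copies (c0 ++ [cand]) nd.items PySem.Dict.empty) cands := by
      rw [pvPruneA_eq_pvF, pvBFilter_eq_pvF]
      congr 1
      funext v
      rw [pvEvents_getD, PySem.Dict.getD_empty]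
      unfold pvEventSeq
      rw [(hperm.flatMap (fun a _ => List.Perm.refl _)).count_eq v]
      ring
    conv_rhs => rw [List.flatMap_cons, pvALoop]
    simp only [hrd]
    rw [if_neg hlen', hnc, if_pos hge']
    simp only [List.flatMap_cons, List.append_assoc]
    rfl
  | case6 c0 d0 cands cand rest h s' cont nd hext c hlen ev nc hge ih =>
    -- internal node, too few candidates left: prune
    intro hinv
    have hlen' : ¬ PySem.List.len (c0 ++ [cand]) = t := hlen
    have hge' : ¬ t - PySem.List.len (c0 ++ [cand]) ≤ PySem.List.len
        (pvBFilter cand (pvEvents copies (c0 ++ [cand]) nd.items PySem.Dict.empty) cands) := hge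
    rw [pvRun]
    simp only [hext]
    rw [if_neg hlen', if_neg hge']
    have hD : DContent d0 (pairDiffs c0) := (hinv _ (List.mem_cons_self ..)).1
    have hg : ∀ v ∈ pairDiffs c0, ((pairDiffs c0).count v : Int) ≤ copies :=
      (hinv _ (List.mem_cons_self ..)).2
    rw [ih (by
      intro g hg'
      rcases List.mem_cons.mp hg' with hg' | hg'
      · subst hg'
        exact ⟨hD, hg⟩
      · exact hinv g (List.mem_cons_of_mem _ hg'))]
    obtain ⟨hEn, hEs⟩ := pvExtend_spec hD hg cand c0
    have hcnt : ∀ v, (pairDiffs (c0 ++ [cand])).count v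
        = (pairDiffs c0 ++ c0.map (fun x => |cand - x|)).count v := by
      intro v
      rw [count_pairDiffs_append, List.count_append]
    obtain ⟨hnd, hbound⟩ := hEs nd hext
    have hndc : DContent nd (pairDiffs (c0 ++ [cand])) :=
      DContent_congr (fun v => (hcnt v).symm) hnd
    have hs : pvIsSidon (c0 ++ [cand]) copies = true := by
      obtain ⟨hSn, _⟩ := pvSidonOuter_spec (g := copies) DContent_empty
        (by simp) (c0 ++ [cand])
      simp only [List.nil_append] at hSn
      unfold pvIsSidon
      cases hcase : pvSidonOuter copies (c0 ++ [cand]) PySem.Dict.empty with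
      | some _ => rfl
      | none =>
        exfalso
        obtain ⟨v, hv, hlt⟩ := hSn.mp hcase
        have hv2 : v ∈ pairDiffs c0 ++ c0.map (fun x => |cand - x|) := by
          rw [← List.count_pos_iff] at hv ⊢
          have := hcnt v
          omega
        have := hbound v hv2
        have := hcnt v
        omega
    have hrd : pvRulerDiff (c0 ++ [cand]) copies
        = some (pvBuildOuter (c0 ++ [cand]) PySem.Dict.empty) := by
      unfold pvRulerDiff
      rw [if_pos hs]
    have hDA : DContent (pvBuildOuter (c0 ++ [cand]) PySem.Dict.empty)
        (pairDiffs (c0 ++ [cand])) := by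
      simpa using pvBuildOuter_content DContent_empty (c0 ++ [cand])
    have hperm : (pvBuildOuter (c0 ++ [cand]) PySem.Dict.empty).items.Perm nd.items :=
      items_perm_of_content hDA hndc
    have hnc : pvPruneA copies (c0 ++ [cand])
        (pvBuildOuter (c0 ++ [cand]) PySem.Dict.empty).items
        (cands.filter (fun number => decide (cand < number)))
        = pvBFilter cand
            (pvEvents copies (c0 ++ [cand]) nd.items PySem.Dict.empty) cands := by
      rw [pvPruneA_eq_pvF, pvBFilter_eq_pvF]
      congr 1
      funext v
      rw [pvEvents_getD, PySem.Dict.getD_empty]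
      unfold pvEventSeq
      rw [(hperm.flatMap (fun a _ => List.Perm.refl _)).count_eq v]
      ring
    conv_rhs => rw [List.flatMap_cons, pvALoop]
    simp only [hrd]
    rw [if_neg hlen', hnc, if_neg hge']
    simp only [List.nil_append]
    rfl

-- ===== VERDICT (by name: the statement is the Claim_ definition above) =====
theorem recursive_multisearch_spec : Claim_equal_recursive_multisearch := by
  intro curr candidates copies target_order _
  unfold Spec_recursive_multisearch recursive_multisearch recursive_multisearch_alt
  have hbase : DContent (pvCntOuter curr PySem.Dict.empty) (pairDiffs curr) := by
    simpa using pvCntOuter_content DContent_empty curr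
  obtain ⟨b1, b2, b3⟩ := hbase
  by_cases hany : (pvCntOuter curr PySem.Dict.empty).values.any
      (fun v => decide (copies < v)) = true
  · rw [if_pos hany]
    obtain ⟨w, hw, hp⟩ := List.any_eq_true.mp hany
    rw [PySem.Dict.values_eq_map_keys _ b3 0] at hw
    obtain ⟨k, hk, rfl⟩ := List.mem_map.mp hw
    apply pvALoop_of_violated
    refine ⟨k, ?_, ?_⟩
    · exact (b2 k).mp ((PySem.Dict.contains_iff_mem_keys _ _).mpr hk)
    · rw [← b1 k]
      exact of_decide_eq_true hp
  · rw [if_neg hany]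
    rw [pvRun_eq_flatMap copies target_order _ ?hinv]
    · simp [List.flatMap]
    case hinv =>
      intro f hf
      rw [List.mem_singleton] at hf
      subst hf
      dsimp only [FrameInv]
      refine ⟨⟨b1, b2, b3⟩, ?_⟩
      intro v hv
      have hkeys : v ∈ (pvCntOuter curr PySem.Dict.empty).keys :=
        (PySem.Dict.contains_iff_mem_keys _ _).mp ((b2 v).mpr hv)
      have hval : (pvCntOuter curr PySem.Dict.empty).getD v 0 ∈
          (pvCntOuter curr PySem.Dict.empty).values := by
        rw [PySem.Dict.values_eq_map_keys _ b3 0]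
        exact List.mem_map.mpr ⟨v, hkeys, rfl⟩
      have hnot : ∀ w ∈ (pvCntOuter curr PySem.Dict.empty).values, ¬ copies < w := by
        intro w hw hlt
        exact hany (List.any_eq_true.mpr ⟨w, hw, decide_eq_true hlt⟩)
      have := hnot _ hval
      rw [b1 v] at this
      omega
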